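-- pv_equiv track=rewrite | github.com/RohithV2001/Strivers-AtoZ-DSA-Sheet | Strings/Isomorphic String.py | groupIsomorphic
-- ===== SOURCE A (Python) =====
-- from collections import defaultdict
--
-- def groupIsomorphic(strs):
--     def encode(s):
--         d = {}
--         return str([d.setdefault(c, len(d)) for c in s])
--
--     groups = defaultdict(list)
--     for s in strs:
--         groups[encode(s)].append(s)
--
--     return list(groups.values())
-- ===== SOURCE B (Python) =====
-- def isIsomorphic(a, b):
--     if len(a) != len(b):
--         return False
--     fwd = {}
--     rev = {}
--     for x, y in zip(a, b):
--         if x in fwd: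
--             if fwd[x] != y:
--                 return False
--         elif y in rev:
--             return False
--         else:
--             fwd[x] = y
--             rev[y] = x
--     return True
--
--
-- def groupIsomorphic(strs):
--     groups = []  # (representative, members) in order of first appearance
--     for s in strs:
--         for rep, members in groups:
--             if isIsomorphic(s, rep):
--                 members.append(s)
--                 break
--         else:
--             groups.append((s, [s]))
--     return [members for _, members in groups]
-- ===== Notes on version B (the rewrite author's own statement) =====
-- stated objective: alternative
-- what changed: B never canonicalises strings: instead of A's hash map keyed by the str() of each string's first-occurrence encoding, B keeps one representative string per group and classifies each string by running a pairwise two-way-mapping isomorphism test against the existing representatives, appending to the first group whose representative is isomorphic.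
import Mathlib
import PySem

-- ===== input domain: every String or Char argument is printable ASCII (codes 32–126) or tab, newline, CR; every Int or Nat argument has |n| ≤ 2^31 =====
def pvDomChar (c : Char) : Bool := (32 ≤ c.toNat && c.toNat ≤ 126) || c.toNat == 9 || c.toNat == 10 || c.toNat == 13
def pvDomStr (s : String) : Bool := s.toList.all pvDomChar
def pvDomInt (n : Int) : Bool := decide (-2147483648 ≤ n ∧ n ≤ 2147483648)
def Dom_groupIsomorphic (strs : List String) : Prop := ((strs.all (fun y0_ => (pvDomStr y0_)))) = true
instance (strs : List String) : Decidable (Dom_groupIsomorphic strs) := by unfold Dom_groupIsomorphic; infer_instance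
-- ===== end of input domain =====

-- B never canonicalises strings: it keeps one representative per group and classifies each string by a
-- pairwise two-way-mapping isomorphism test against the representatives (objective: alternative, no speed claim).

-- ===== PORT A =====
-- hand port of Python's str() of a list of ints: '[' + ', '.join(map(str, l)) + ']' (exact for int entries)
def pyJoinComma (bs : List (List Char)) : List Char :=
  match bs with
  | [] => []
  | [b] => b
  | b :: rest => b ++ ',' :: ' ' :: pyJoinComma rest

def pyReprIntList (l : List Int) : String :=
  String.ofList ('[' :: (pyJoinComma (l.map PySem.Int.toChars) ++ [']']))

-- encode(s): d.setdefault(c, len(d)) for each c, then str() of the collected list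
def pyEncode (s : String) : String :=
  let r := s.toList.foldl
    (fun (st : PySem.Dict Char Int × List Int) c =>
      (st.1.setdefault c (st.1.size : Int), st.2 ++ [st.1.getD c (st.1.size : Int)]))
    (⟨[]⟩, [])
  pyReprIntList r.2

def groupIsomorphic (strs : List String) : List (List String) :=
  (strs.foldl (fun g s => g.modify (pyEncode s) [] (· ++ [s]))
    (⟨[]⟩ : PySem.Dict String (List String))).values

-- ===== PORT B =====
-- the for/return loop of isIsomorphic: early 'return False' becomes the recursion returning false;
-- 'x in fwd' + 'fwd[x]' are rendered as one match on fwd.get? x (exact: contains = get?.isSome)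
def isoLoop : List (Char × Char) → PySem.Dict Char Char → PySem.Dict Char Char → Bool
  | [], _, _ => true
  | (x, y) :: rest, fwd, rev =>
    match fwd.get? x with
    | some z => if z = y then isoLoop rest fwd rev else false
    | none =>
      if rev.contains y then false
      else isoLoop rest (fwd.insert x y) (rev.insert y x)

def isIsomorphic (a b : String) : Bool :=
  if a.toList.length = b.toList.length then isoLoop (a.toList.zip b.toList) ⟨[]⟩ ⟨[]⟩ else false

-- the for/break/else scan over groups: append s to the first group whose representative is isomorphic,
-- else start a new group represented by s
def addGroup : List (String × List String) → String → List (String × List String)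
  | [], s => [(s, [s])]
  | (rep, ms) :: rest, s =>
    if isIsomorphic s rep then (rep, ms ++ [s]) :: rest else (rep, ms) :: addGroup rest s

def groupIsomorphic_alt (strs : List String) : List (List String) :=
  (strs.foldl addGroup []).map (·.2)

-- ===== PRECONDITION & SPEC =====
def Spec_groupIsomorphic (strs : List String) (out : List (List String)) : Prop := out = groupIsomorphic_alt strs
instance (strs : List String) (out : List (List String)) : Decidable (Spec_groupIsomorphic strs out) := by unfold Spec_groupIsomorphic; infer_instance

-- ===== CLAIM (what is proved, stated in full; the proofs are below) =====
def Claim_equal_groupIsomorphic : Prop := ∀ (strs : List String), Dom_groupIsomorphic strs → Spec_groupIsomorphic strs (groupIsomorphic strs)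

-- ===== LEMMAS AND PROOFS =====

-- the first-occurrence pattern, proof-side only: the value both programs implicitly group by
def patList : List Char → List Char → List Int
  | [], _ => []
  | c :: cs, seen =>
    match PySem.List.index? seen c with
    | some i => (i : Int) :: patList cs seen
    | none => (seen.length : Int) :: patList cs (seen ++ [c])

def pat (s : String) : List Int := patList s.toList []

lemma patList_cons_mem {seen : List Char} {c : Char} {i : Nat}
    (h : PySem.List.index? seen c = some i) (cs : List Char) :
    patList (c :: cs) seen = (i : Int) :: patList cs seen := by
  simp only [patList]
  rw [h]

lemma patList_cons_new {seen : List Char} {c : Char}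
    (h : PySem.List.index? seen c = none) (cs : List Char) :
    patList (c :: cs) seen = (seen.length : Int) :: patList cs (seen ++ [c]) := by
  simp only [patList]
  rw [h]

lemma patList_length (cs : List Char) : ∀ seen, (patList cs seen).length = cs.length := by
  induction cs with
  | nil => intro seen; simp [patList]
  | cons c cs ih =>
    intro seen
    cases hix : PySem.List.index? seen c with
    | some i => rw [patList_cons_mem hix]; simp [ih]
    | none => rw [patList_cons_new hix]; simp [ih]

lemma patList_nonneg (cs : List Char) : ∀ seen, ∀ v ∈ patList cs seen, 0 ≤ v := by
  induction cs with
  | nil => intro seen v hv; simp [patList] at hv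
  | cons c cs ih =>
    intro seen v hv
    cases hix : PySem.List.index? seen c with
    | some i =>
      rw [patList_cons_mem hix] at hv
      rcases List.mem_cons.mp hv with h | h
      · subst h; positivity
      · exact ih seen v h
    | none =>
      rw [patList_cons_new hix] at hv
      rcases List.mem_cons.mp hv with h | h
      · subst h; positivity
      · exact ih (seen ++ [c]) v h

lemma digitChar_ne_comma {m : Nat} (h : m < 10) : Nat.digitChar m ≠ ',' := by
  interval_cases m <;> decide

lemma toDigits_ne_comma (n : Nat) : ∀ c ∈ Nat.toDigits 10 n, c ≠ ',' := by
  induction n using Nat.strong_induction_on with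
  | _ n ih =>
    rw [Nat.toDigits_eq_if (by norm_num)]
    split
    · next h => intro c hc; simp at hc; subst hc; exact digitChar_ne_comma h
    · next h =>
      intro c hc
      rcases List.mem_append.mp hc with h1 | h1
      · exact ih (n / 10) (Nat.div_lt_self (by omega) (by norm_num)) c h1
      · simp at h1; subst h1; exact digitChar_ne_comma (Nat.mod_lt _ (by norm_num))

lemma toDigits_ne_nil (n : Nat) : Nat.toDigits 10 n ≠ [] := by
  rw [Nat.toDigits_eq_if (by norm_num)]
  split <;> simp

lemma digitChar_inj : ∀ m < 10, ∀ n < 10, Nat.digitChar m = Nat.digitChar n → m = n := by decide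

lemma toDigits_inj : ∀ (m n : Nat), Nat.toDigits 10 m = Nat.toDigits 10 n → m = n := by
  intro m
  induction m using Nat.strong_induction_on with
  | _ m ih =>
    intro n h
    rw [Nat.toDigits_eq_if (b := 10) (n := m) (by norm_num), Nat.toDigits_eq_if (b := 10) (n := n) (by norm_num)] at h
    split at h <;> split at h
    · next hm hn => exact digitChar_inj m hm n hn (by simpa using h)
    · next hm hn =>
      exfalso
      have h2 : ([Nat.digitChar m]).length = (Nat.toDigits 10 (n / 10) ++ [(n % 10).digitChar]).length := by rw [h]
      have := toDigits_ne_nil (n / 10)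
      cases hq : Nat.toDigits 10 (n / 10) with
      | nil => exact this hq
      | cons a t => rw [hq] at h2; simp at h2
    · next hm hn =>
      exfalso
      have h2 : (Nat.toDigits 10 (m / 10) ++ [(m % 10).digitChar]).length = ([Nat.digitChar n]).length := by rw [h]
      have := toDigits_ne_nil (m / 10)
      cases hq : Nat.toDigits 10 (m / 10) with
      | nil => exact this hq
      | cons a t => rw [hq] at h2; simp at h2
    · next hm hn =>
      obtain ⟨h1, h2⟩ := List.append_inj' h (by simp)
      have hd : m / 10 = n / 10 := ih (m / 10) (Nat.div_lt_self (by omega) (by norm_num)) _ h1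
      have hm10 := digitChar_inj (m % 10) (Nat.mod_lt _ (by norm_num)) (n % 10) (Nat.mod_lt _ (by norm_num)) (by simpa using h2)
      omega

lemma toChars_of_nonneg {n : Int} (h : 0 ≤ n) : PySem.Int.toChars n = Nat.toDigits 10 n.toNat := by
  simp [PySem.Int.toChars, not_lt.mpr h]

lemma toChars_inj {m n : Int} (hm : 0 ≤ m) (hn : 0 ≤ n)
    (h : PySem.Int.toChars m = PySem.Int.toChars n) : m = n := by
  rw [toChars_of_nonneg hm, toChars_of_nonneg hn] at h
  have := toDigits_inj _ _ h
  omega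

lemma toChars_nc {n : Int} (h : 0 ≤ n) : ∀ c ∈ PySem.Int.toChars n, (c != ',') = true := by
  rw [toChars_of_nonneg h]
  intro c hc
  simpa using toDigits_ne_comma _ c hc

lemma toChars_nonnil {n : Int} (h : 0 ≤ n) : PySem.Int.toChars n ≠ [] := by
  rw [toChars_of_nonneg h]; exact toDigits_ne_nil _

lemma takeWhile_block {b r : List Char} (hb : ∀ c ∈ b, (c != ',') = true) :
    List.takeWhile (fun c => c != ',') (b ++ ',' :: r) = b := by
  rw [List.takeWhile_append]
  rw [List.takeWhile_eq_self_iff.mpr hb]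
  simp [List.takeWhile]

lemma dropWhile_block {b r : List Char} (hb : ∀ c ∈ b, (c != ',') = true) :
    List.dropWhile (fun c => c != ',') (b ++ ',' :: r) = ',' :: r := by
  rw [List.dropWhile_append]
  have : List.dropWhile (fun c => c != ',') b = [] := List.dropWhile_eq_nil_iff.mpr (by intro c hc; simp_all)
  rw [this]
  simp [List.dropWhile]

lemma joinComma_inj : ∀ (l1 l2 : List Int), (∀ x ∈ l1, 0 ≤ x) → (∀ x ∈ l2, 0 ≤ x) →
    pyJoinComma (l1.map PySem.Int.toChars) = pyJoinComma (l2.map PySem.Int.toChars) → l1 = l2 := by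
  intro l1
  induction l1 with
  | nil =>
    intro l2 _ h2 h
    cases l2 with
    | nil => rfl
    | cons b t =>
      exfalso
      cases t <;> simp [pyJoinComma] at h <;>
        exact toChars_nonnil (h2 b (by simp)) h
  | cons a t1 ih =>
    intro l2 h1 h2 h
    cases l2 with
    | nil =>
      exfalso
      cases t1 <;> simp [pyJoinComma] at h <;>
        exact toChars_nonnil (h1 a (by simp)) h
    | cons b t2 =>
      have ha : 0 ≤ a := h1 a (by simp)
      have hbn : 0 ≤ b := h2 b (by simp)
      cases t1 with
      | nil =>
        cases t2 with
        | nil =>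
          simp [pyJoinComma] at h
          rw [toChars_inj ha hbn h]
        | cons x xs =>
          exfalso
          simp [pyJoinComma] at h
          have hw := congrArg (List.takeWhile (fun c => c != ',')) h
          rw [List.takeWhile_eq_self_iff.mpr (toChars_nc ha)] at hw
          rw [takeWhile_block (toChars_nc hbn)] at hw
          rw [hw] at h
          have := congrArg List.length h
          simp at this
      | cons x xs =>
        cases t2 with
        | nil =>
          exfalso
          simp [pyJoinComma] at h
          have hw := congrArg (List.takeWhile (fun c => c != ',')) h
          rw [List.takeWhile_eq_self_iff.mpr (toChars_nc hbn)] at hw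
          rw [takeWhile_block (toChars_nc ha)] at hw
          rw [← hw] at h
          have := congrArg List.length h
          simp at this
        | cons y ys =>
          simp only [List.map_cons, pyJoinComma] at h
          have hw := congrArg (List.takeWhile (fun c => c != ',')) h
          rw [takeWhile_block (toChars_nc ha), takeWhile_block (toChars_nc hbn)] at hw
          have hd := congrArg (List.dropWhile (fun c => c != ',')) h
          rw [dropWhile_block (toChars_nc ha), dropWhile_block (toChars_nc hbn)] at hd
          simp only [List.cons.injEq, true_and] at hd
          have := ih (y :: ys) (by intro z hz; exact h1 z (by simp_all)) (by intro z hz; exact h2 z (by simp_all)) (by simpa using hd)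
          rw [toChars_inj ha hbn hw, this]

lemma repr_inj {l1 l2 : List Int} (h1 : ∀ x ∈ l1, 0 ≤ x) (h2 : ∀ x ∈ l2, 0 ≤ x)
    (h : pyReprIntList l1 = pyReprIntList l2) : l1 = l2 := by
  have hl := congrArg String.toList h
  simp only [pyReprIntList, String.toList_ofList, List.cons.injEq, true_and] at hl
  exact joinComma_inj l1 l2 h1 h2 (List.append_cancel_right hl)

def idxFrom (seen : List Char) (n : Nat) : List (Char × Int) :=
  (seen.zipIdx n).map (fun p => (p.1, (p.2 : Int)))

lemma get?_idxFrom : ∀ (seen : List Char) (n : Nat) (c : Char),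
    (PySem.Dict.mk (idxFrom seen n) : PySem.Dict Char Int).get? c
      = (PySem.List.index? seen c).map (fun i => ((n + i : Nat) : Int)) := by
  intro seen
  induction seen with
  | nil => intro n c; simp [idxFrom, PySem.Dict.get?, PySem.List.index?]
  | cons a t ih =>
    intro n c
    simp only [idxFrom, List.zipIdx_cons, List.map_cons] at *
    rw [PySem.Dict.get?_mk_cons]
    by_cases hac : a = c
    · subst hac
      rw [PySem.List.index?_cons_self]
      simp
    · rw [PySem.List.index?_cons_of_ne t hac]
      simp only [beq_iff_eq, if_neg hac]
      rw [ih (n + 1) c]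
      cases PySem.List.index? t c <;> simp <;> omega

lemma contains_idxFrom (seen : List Char) (n : Nat) (c : Char) :
    (PySem.Dict.mk (idxFrom seen n) : PySem.Dict Char Int).contains c = decide (c ∈ seen) := by
  rw [PySem.Dict.contains_eq_isSome_get?, get?_idxFrom]
  cases hix : PySem.List.index? seen c with
  | none => simp [(PySem.List.index?_eq_none_iff seen c).mp hix]
  | some i =>
    have hmem : c ∈ seen := by
      have h2 := congrArg Option.isSome hix
      simp at h2
      exact h2
    simp [hmem]

lemma size_idxFrom (seen : List Char) (n : Nat) :
    (PySem.Dict.mk (idxFrom seen n) : PySem.Dict Char Int).size = seen.length := by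
  simp [PySem.Dict.size, idxFrom]

-- A's setdefault loop produces exactly the first-occurrence pattern
lemma encode_loop : ∀ (cs : List Char) (seen : List Char) (d : PySem.Dict Char Int) (out : List Int),
    d.items = idxFrom seen 0 → seen.Nodup →
    (cs.foldl
      (fun (st : PySem.Dict Char Int × List Int) c =>
        (st.1.setdefault c (st.1.size : Int), st.2 ++ [st.1.getD c (st.1.size : Int)]))
      (d, out)).2
    = out ++ patList cs seen := by
  intro cs
  induction cs with
  | nil => intro seen d out _ _; simp [patList]
  | cons c cs ih =>
    intro seen d out hitems hnd
    have hd : d = PySem.Dict.mk (idxFrom seen 0) := PySem.Dict.ext hitems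
    subst hd
    simp only [List.foldl_cons]
    cases hix : PySem.List.index? seen c with
    | some i =>
      have hc : c ∈ seen := by
        obtain ⟨hk, hgi, -⟩ := PySem.List.getElem_of_index?_eq_some hix
        exact hgi ▸ List.getElem_mem hk
      have hcont : (PySem.Dict.mk (idxFrom seen 0) : PySem.Dict Char Int).contains c = true := by
        rw [contains_idxFrom]; simpa
      rw [PySem.Dict.setdefault_of_contains _ _ hcont]
      have hval : (PySem.Dict.mk (idxFrom seen 0) : PySem.Dict Char Int).getD c
          ((PySem.Dict.mk (idxFrom seen 0) : PySem.Dict Char Int).size : Int) = (i : Int) := by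
        rw [PySem.Dict.getD_eq_get?_getD, get?_idxFrom, hix]
        simp
      rw [hval, ih seen ⟨idxFrom seen 0⟩ _ rfl hnd, patList_cons_mem hix]
      simp
    | none =>
      have hc : c ∉ seen := (PySem.List.index?_eq_none_iff seen c).mp hix
      have hcont : (PySem.Dict.mk (idxFrom seen 0) : PySem.Dict Char Int).contains c = false := by
        rw [contains_idxFrom]; simpa
      rw [PySem.Dict.setdefault_of_not_contains _ _ hcont]
      have hval : (PySem.Dict.mk (idxFrom seen 0) : PySem.Dict Char Int).getD c
          ((PySem.Dict.mk (idxFrom seen 0) : PySem.Dict Char Int).size : Int) = (seen.length : Int) := by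
        rw [PySem.Dict.getD_eq_get?_getD, get?_idxFrom, hix]
        simp [size_idxFrom]
      rw [hval]
      have hins : (PySem.Dict.mk (idxFrom seen 0) : PySem.Dict Char Int).insert c ((PySem.Dict.mk (idxFrom seen 0) : PySem.Dict Char Int).size : Int) = (⟨idxFrom (seen ++ [c]) 0⟩ : PySem.Dict Char Int) := by
        apply PySem.Dict.ext
        rw [PySem.Dict.items_insert_of_not_contains _ _ hcont]
        show idxFrom seen 0 ++ [(c, ((idxFrom seen 0).length : Int))] = idxFrom (seen ++ [c]) 0
        simp [idxFrom, List.zipIdx_append]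
      rw [hins]
      have hnd' : (seen ++ [c]).Nodup := by
        rw [List.nodup_append]
        refine ⟨hnd, by simp, ?_⟩
        intro a ha b hb
        simp at hb
        subst hb
        exact fun e => hc (e ▸ ha)
      rw [ih (seen ++ [c]) ⟨idxFrom (seen ++ [c]) 0⟩ _ rfl hnd', patList_cons_new hix]
      simp

lemma pyEncode_eq (s : String) : pyEncode s = pyReprIntList (pat s) := by
  unfold pyEncode pat
  exact congrArg pyReprIntList (by simpa using encode_loop s.toList [] ⟨[]⟩ [] rfl List.nodup_nil)

lemma encode_eq_iff (a b : String) : pyEncode a = pyEncode b ↔ pat a = pat b := by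
  constructor
  · intro h
    rw [pyEncode_eq, pyEncode_eq] at h
    exact repr_inj (patList_nonneg a.toList []) (patList_nonneg b.toList []) h
  · intro h
    rw [pyEncode_eq, pyEncode_eq, h]

-- B's forward/reverse dicts as zips of the two seen-lists
lemma get?_zip : ∀ (sA sB : List Char), sA.length = sB.length → ∀ x,
    (PySem.Dict.mk (sA.zip sB) : PySem.Dict Char Char).get? x
      = (PySem.List.index? sA x).bind (fun i => sB[i]?) := by
  intro sA
  induction sA with
  | nil => intro sB h x; simp [PySem.Dict.get?, PySem.List.index?]
  | cons a t ih =>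
    intro sB h x
    cases sB with
    | nil => simp at h
    | cons b u =>
      simp only [List.zip_cons_cons]
      rw [PySem.Dict.get?_mk_cons]
      by_cases hax : a = x
      · subst hax
        rw [PySem.List.index?_cons_self]
        simp
      · rw [PySem.List.index?_cons_of_ne t hax]
        simp only [beq_iff_eq, if_neg hax]
        rw [ih u (by simpa using h) x]
        cases PySem.List.index? t x <;> simp

lemma contains_zip (sA sB : List Char) (h : sA.length = sB.length) (x : Char) :
    (PySem.Dict.mk (sA.zip sB) : PySem.Dict Char Char).contains x = decide (x ∈ sA) := by
  rw [PySem.Dict.contains_eq_isSome_get?, get?_zip sA sB h]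
  cases hix : PySem.List.index? sA x with
  | none => simp [(PySem.List.index?_eq_none_iff sA x).mp hix]
  | some i =>
    obtain ⟨hk, hgi, -⟩ := PySem.List.getElem_of_index?_eq_some hix
    have hmem : x ∈ sA := hgi ▸ List.getElem_mem hk
    have hk' : i < sB.length := h ▸ hk
    simp [List.getElem?_eq_getElem hk', hmem]

lemma index?_getElem_nodup {l : List Char} (hnd : l.Nodup) {i : Nat} (hi : i < l.length) :
    PySem.List.index? l l[i] = some i := by
  have hmem : l[i] ∈ l := List.getElem_mem hi
  cases hix : PySem.List.index? l l[i] with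
  | none => exact absurd ((PySem.List.index?_eq_none_iff _ _).mp hix) (by simp [hmem])
  | some j =>
    obtain ⟨hj, hgj, -⟩ := PySem.List.getElem_of_index?_eq_some hix
    have : j = i := (List.Nodup.getElem_inj_iff hnd).mp hgj
    rw [this]

lemma isoLoop_cons_some {fwd rev : PySem.Dict Char Char} {x y z : Char} {rest : List (Char × Char)}
    (h : fwd.get? x = some z) :
    isoLoop ((x, y) :: rest) fwd rev = if z = y then isoLoop rest fwd rev else false := by
  simp [isoLoop, h]

lemma isoLoop_cons_none {fwd rev : PySem.Dict Char Char} {x y : Char} {rest : List (Char × Char)}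
    (h : fwd.get? x = none) :
    isoLoop ((x, y) :: rest) fwd rev
      = if rev.contains y then false
        else isoLoop rest (fwd.insert x y) (rev.insert y x) := by
  simp [isoLoop, h]

-- the pairwise loop succeeds exactly when the two first-occurrence patterns agree
lemma isoLoop_iff : ∀ (ps : List (Char × Char)) (sA sB : List Char),
    sA.Nodup → sB.Nodup → sA.length = sB.length →
    (isoLoop ps ⟨sA.zip sB⟩ ⟨sB.zip sA⟩ = true
      ↔ patList (ps.map Prod.fst) sA = patList (ps.map Prod.snd) sB) := by
  intro ps
  induction ps with
  | nil => intro sA sB _ _ _; simp [isoLoop, patList]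
  | cons p rest ih =>
    obtain ⟨x, y⟩ := p
    intro sA sB hndA hndB hlen
    simp only [List.map_cons]
    cases hix : PySem.List.index? sA x with
    | some i =>
      obtain ⟨hk, hxi, -⟩ := PySem.List.getElem_of_index?_eq_some hix
      have hk' : i < sB.length := hlen ▸ hk
      have hget : (PySem.Dict.mk (sA.zip sB) : PySem.Dict Char Char).get? x = some sB[i] := by
        rw [get?_zip sA sB hlen x, hix]
        simp [List.getElem?_eq_getElem hk']
      rw [isoLoop_cons_some hget, patList_cons_mem hix]
      by_cases hz : sB[i] = y
      · have hiy : PySem.List.index? sB y = some i := by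
          rw [← hz]; exact index?_getElem_nodup hndB hk'
        rw [patList_cons_mem hiy]
        simp only [if_pos hz]
        rw [ih sA sB hndA hndB hlen]
        simp
      · simp only [if_neg hz]
        constructor
        · intro h; simp at h
        · intro h
          exfalso
          cases hiy : PySem.List.index? sB y with
          | some j =>
            rw [patList_cons_mem hiy] at h
            obtain ⟨hj, hyj, -⟩ := PySem.List.getElem_of_index?_eq_some hiy
            have hij : (i : Int) = (j : Int) := (List.cons.injEq _ _ _ _ ▸ h).1
            have hij' : i = j := by exact_mod_cast hij
            subst hij'
            exact hz hyj
          | none =>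
            rw [patList_cons_new hiy] at h
            have hij : (i : Int) = (sB.length : Int) := (List.cons.injEq _ _ _ _ ▸ h).1
            have : i = sB.length := by exact_mod_cast hij
            omega
    | none =>
      have hxm : x ∉ sA := (PySem.List.index?_eq_none_iff sA x).mp hix
      have hget : (PySem.Dict.mk (sA.zip sB) : PySem.Dict Char Char).get? x = none := by
        rw [get?_zip sA sB hlen x, hix]
        rfl
      rw [isoLoop_cons_none hget, patList_cons_new hix, contains_zip sB sA hlen.symm y]
      by_cases hy : y ∈ sB
      · simp only [hy, decide_true, if_true]
        constructor
        · intro h; simp at h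
        · intro h
          exfalso
          cases hjy : PySem.List.index? sB y with
          | none => exact absurd ((PySem.List.index?_eq_none_iff sB y).mp hjy) (by simp [hy])
          | some j =>
            rw [patList_cons_mem hjy] at h
            obtain ⟨hj, -, -⟩ := PySem.List.getElem_of_index?_eq_some hjy
            have hij : (sA.length : Int) = (j : Int) := (List.cons.injEq _ _ _ _ ▸ h).1
            have : sA.length = j := by exact_mod_cast hij
            omega
      · simp only [hy, decide_false]
        have hiy : PySem.List.index? sB y = none := (PySem.List.index?_eq_none_iff sB y).mpr hy
        rw [patList_cons_new hiy]
        have hfwd : (PySem.Dict.mk (sA.zip sB) : PySem.Dict Char Char).insert x y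
            = (⟨(sA ++ [x]).zip (sB ++ [y])⟩ : PySem.Dict Char Char) := by
          apply PySem.Dict.ext
          have hcf : (PySem.Dict.mk (sA.zip sB) : PySem.Dict Char Char).contains x = false := by
            rw [contains_zip sA sB hlen]; simpa
          rw [PySem.Dict.items_insert_of_not_contains _ _ hcf]
          show sA.zip sB ++ [(x, y)] = (sA ++ [x]).zip (sB ++ [y])
          rw [List.zip_append (by omega)]
          rfl
        have hrev : (PySem.Dict.mk (sB.zip sA) : PySem.Dict Char Char).insert y x
            = (⟨(sB ++ [y]).zip (sA ++ [x])⟩ : PySem.Dict Char Char) := by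
          apply PySem.Dict.ext
          have hcr : (PySem.Dict.mk (sB.zip sA) : PySem.Dict Char Char).contains y = false := by
            rw [contains_zip sB sA hlen.symm]; simpa
          rw [PySem.Dict.items_insert_of_not_contains _ _ hcr]
          show sB.zip sA ++ [(y, x)] = (sB ++ [y]).zip (sA ++ [x])
          rw [List.zip_append (by omega)]
          rfl
        have hndA' : (sA ++ [x]).Nodup := by
          rw [List.nodup_append]
          exact ⟨hndA, by simp, by intro a ha b hb; simp at hb; subst hb; exact fun e => hxm (e ▸ ha)⟩
        have hndB' : (sB ++ [y]).Nodup := by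
          rw [List.nodup_append]
          exact ⟨hndB, by simp, by intro a ha b hb; simp at hb; subst hb; exact fun e => hy (e ▸ ha)⟩
        simp only [Bool.false_eq_true, if_false]
        rw [hfwd, hrev, ih (sA ++ [x]) (sB ++ [y]) hndA' hndB' (by simp [hlen])]
        simp [hlen]

lemma isIso_iff_pat (a b : String) : isIsomorphic a b = true ↔ pat a = pat b := by
  unfold isIsomorphic pat
  by_cases hlen : a.toList.length = b.toList.length
  · rw [if_pos hlen]
    have := isoLoop_iff (a.toList.zip b.toList) [] [] List.nodup_nil List.nodup_nil rfl
    rwa [List.map_fst_zip (le_of_eq hlen), List.map_snd_zip (le_of_eq hlen.symm)] at this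
  · rw [if_neg hlen]
    constructor
    · intro h; simp at h
    · intro h
      exfalso
      have := congrArg List.length h
      rw [patList_length, patList_length] at this
      exact hlen this

-- the bridge between the two group states
def mapG (gs : List (String × List String)) : List (String × List String) :=
  gs.map (fun g => (pyEncode g.1, g.2))

lemma insert_mk_cons {rq key : String} {ms : List String} {t : List (String × List String)}
    (h : (rq == key) = false) (v : List String) :
    ((PySem.Dict.mk ((rq, ms) :: t)).insert key v).items
      = (rq, ms) :: ((PySem.Dict.mk t).insert key v).items := by
  have hct : (PySem.Dict.mk ((rq, ms) :: t) : PySem.Dict String (List String)).contains key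
      = (PySem.Dict.mk t : PySem.Dict String (List String)).contains key := by
    rw [PySem.Dict.contains_mk, PySem.Dict.contains_mk]
    simp [h]
  cases hc : (PySem.Dict.mk t : PySem.Dict String (List String)).contains key with
  | true =>
    rw [PySem.Dict.items_insert_of_contains _ _ (hct.trans hc),
        PySem.Dict.items_insert_of_contains _ _ hc]
    simp
    exact fun e => absurd e (by simpa using h)
  | false =>
    rw [PySem.Dict.items_insert_of_not_contains _ _ (hct.trans hc),
        PySem.Dict.items_insert_of_not_contains _ _ hc]
    simp

lemma map_pat_addGroup : ∀ (gs : List (String × List String)) (s : String),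
    (addGroup gs s).map (fun g => pat g.1)
      = if pat s ∈ gs.map (fun g => pat g.1) then gs.map (fun g => pat g.1)
        else gs.map (fun g => pat g.1) ++ [pat s] := by
  intro gs s
  induction gs with
  | nil => simp [addGroup]
  | cons g rest ih =>
    obtain ⟨rep, ms⟩ := g
    by_cases hiso : isIsomorphic s rep = true
    · have hps : pat s = pat rep := (isIso_iff_pat s rep).mp hiso
      simp [addGroup, hiso, hps]
    · have hps : pat s ≠ pat rep := fun e => hiso ((isIso_iff_pat s rep).mpr e)
      simp only [addGroup, if_neg hiso, List.map_cons, ih]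
      by_cases hp : pat s ∈ rest.map (fun g => pat g.1)
      · simp [hp]
      · simp [hp, hps]

lemma nodup_addGroup {gs : List (String × List String)} {s : String}
    (hnd : (gs.map (fun g => pat g.1)).Nodup) :
    ((addGroup gs s).map (fun g => pat g.1)).Nodup := by
  rw [map_pat_addGroup]
  by_cases hp : pat s ∈ gs.map (fun g => pat g.1)
  · simpa [hp] using hnd
  · rw [if_neg hp, List.nodup_append]
    refine ⟨hnd, by simp, ?_⟩
    intro a ha b hb
    simp at hb
    subst hb
    exact fun e => hp (e ▸ ha)

lemma stepG : ∀ (s : String) (gs : List (String × List String)),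
    (gs.map (fun g => pat g.1)).Nodup →
    ((PySem.Dict.mk (mapG gs)).modify (pyEncode s) [] (· ++ [s])).items
      = mapG (addGroup gs s) := by
  intro s gs
  induction gs with
  | nil =>
    intro _
    simp only [PySem.Dict.modify, mapG, List.map_nil, addGroup]
    have hc : (PySem.Dict.mk [] : PySem.Dict String (List String)).contains (pyEncode s) = false := by
      rw [PySem.Dict.contains_mk]; simp
    rw [PySem.Dict.items_insert_of_not_contains _ _ hc]
    rw [PySem.Dict.getD_of_get?_eq_none _ _ ((PySem.Dict.get?_eq_none_iff_contains _ _).mpr hc)]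
    simp
  | cons g rest ih =>
    intro hnd
    obtain ⟨rep, ms⟩ := g
    by_cases hiso : isIsomorphic s rep = true
    · have henc : pyEncode s = pyEncode rep :=
        (encode_eq_iff s rep).mpr ((isIso_iff_pat s rep).mp hiso)
      simp only [PySem.Dict.modify, mapG, List.map_cons, addGroup, hiso, if_true, henc]
      have hc : (PySem.Dict.mk ((pyEncode rep, ms) :: List.map (fun g => (pyEncode g.1, g.2)) rest) : PySem.Dict String (List String)).contains (pyEncode rep) = true := by
        rw [PySem.Dict.contains_mk]; simp
      have hgd : (PySem.Dict.mk ((pyEncode rep, ms) :: List.map (fun g => (pyEncode g.1, g.2)) rest) : PySem.Dict String (List String)).getD (pyEncode rep) [] = ms := by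
        rw [PySem.Dict.getD_eq_get?_getD, PySem.Dict.get?_mk_cons]
        simp
      rw [hgd, PySem.Dict.items_insert_of_contains _ _ hc]
      simp only [List.map_cons]
      have htail : ∀ e ∈ List.map (fun g => (pyEncode g.1, g.2)) rest,
          (if (e.1 == pyEncode rep) = true then (pyEncode rep, ms ++ [s]) else e) = e := by
        intro e he
        rcases List.mem_map.mp he with ⟨g', hg', rfl⟩
        have hne : pyEncode g'.1 ≠ pyEncode rep := by
          intro heq
          have hq' : pat g'.1 = pat rep := (encode_eq_iff g'.1 rep).mp heq
          rw [List.map_cons, List.nodup_cons] at hnd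
          exact hnd.1 (hq' ▸ List.mem_map.mpr ⟨g', hg', rfl⟩)
        simp [hne]
      rw [List.map_congr_left htail, List.map_id']
      simp
    · have hne : pyEncode rep ≠ pyEncode s := by
        intro heq
        exact hiso ((isIso_iff_pat s rep).mpr ((encode_eq_iff rep s).mp heq).symm)
      have hbe : (pyEncode rep == pyEncode s) = false := beq_eq_false_iff_ne.mpr hne
      simp only [PySem.Dict.modify, mapG, List.map_cons]
      have hgd : (PySem.Dict.mk ((pyEncode rep, ms) :: List.map (fun g => (pyEncode g.1, g.2)) rest) : PySem.Dict String (List String)).getD (pyEncode s) []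
          = (PySem.Dict.mk (List.map (fun g => (pyEncode g.1, g.2)) rest) : PySem.Dict String (List String)).getD (pyEncode s) [] := by
        rw [PySem.Dict.getD_eq_get?_getD, PySem.Dict.getD_eq_get?_getD, PySem.Dict.get?_mk_cons]
        simp [hbe]
      rw [hgd, insert_mk_cons hbe]
      have ih' := ih (by simp at hnd; exact hnd.2)
      simp only [PySem.Dict.modify, mapG] at ih'
      rw [ih']
      simp [addGroup, if_neg hiso]

lemma main_loop : ∀ (strs : List String) (gs : List (String × List String)),
    (gs.map (fun g => pat g.1)).Nodup →
    (strs.foldl (fun g s => g.modify (pyEncode s) [] (· ++ [s])) (PySem.Dict.mk (mapG gs))).values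
      = ((strs.foldl addGroup gs).map (·.2)) := by
  intro strs
  induction strs with
  | nil =>
    intro gs _
    simp [PySem.Dict.values, mapG]
  | cons s rest ih =>
    intro gs hnd
    simp only [List.foldl_cons]
    have hdict : (PySem.Dict.mk (mapG gs)).modify (pyEncode s) [] (· ++ [s])
        = PySem.Dict.mk (mapG (addGroup gs s)) := by
      apply PySem.Dict.ext
      exact stepG s gs hnd
    rw [hdict]
    exact ih _ (nodup_addGroup hnd)

-- ===== VERDICT (by name: the statement is the Claim_ definition above) =====
theorem groupIsomorphic_spec : Claim_equal_groupIsomorphic := by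
  intro strs _
  unfold Spec_groupIsomorphic groupIsomorphic groupIsomorphic_alt
  have := main_loop strs [] (by simp)
  simpa [mapG] using this
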